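-- pv_equiv track=rewrite | github.com/htang7415/Max-Handbook | modules/software-engineering/tooling/reproducible-dev-environments/python/reproducible_dev_environments.py | environment_drift
-- ===== SOURCE A (Python) =====
-- def environment_drift(required: dict[str, str], actual: dict[str, str]) -> dict[str, list[str]]:
--     missing = sorted(name for name in required if name not in actual)
--     mismatched = sorted(
--         name for name, version in required.items() if name in actual and actual[name] != version
--     )
--     unexpected = sorted(name for name in actual if name not in required)
--     return {
--         "missing": missing,
--         "mismatched": mismatched,
--         "unexpected": unexpected,
--     }
-- ===== SOURCE B (Python) =====
-- def environment_drift(required: dict[str, str], actual: dict[str, str]) -> dict[str, list[str]]: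
--     missing, mismatched, unexpected = [], [], []
--     for name in sorted(set(required) | set(actual)):
--         if name not in actual:
--             missing.append(name)
--         elif name not in required:
--             unexpected.append(name)
--         elif required[name] != actual[name]:
--             mismatched.append(name)
--     return {"missing": missing, "mismatched": mismatched, "unexpected": unexpected}
-- ===== Notes on version B (the rewrite author's own statement) =====
-- stated objective: alternative
-- what changed: Replaces A's three separate filtered comprehensions (each followed by its own sort) with a single classification loop over the sorted union of the two key sets, appending each key to exactly one of the three buckets.
import Mathlib
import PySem

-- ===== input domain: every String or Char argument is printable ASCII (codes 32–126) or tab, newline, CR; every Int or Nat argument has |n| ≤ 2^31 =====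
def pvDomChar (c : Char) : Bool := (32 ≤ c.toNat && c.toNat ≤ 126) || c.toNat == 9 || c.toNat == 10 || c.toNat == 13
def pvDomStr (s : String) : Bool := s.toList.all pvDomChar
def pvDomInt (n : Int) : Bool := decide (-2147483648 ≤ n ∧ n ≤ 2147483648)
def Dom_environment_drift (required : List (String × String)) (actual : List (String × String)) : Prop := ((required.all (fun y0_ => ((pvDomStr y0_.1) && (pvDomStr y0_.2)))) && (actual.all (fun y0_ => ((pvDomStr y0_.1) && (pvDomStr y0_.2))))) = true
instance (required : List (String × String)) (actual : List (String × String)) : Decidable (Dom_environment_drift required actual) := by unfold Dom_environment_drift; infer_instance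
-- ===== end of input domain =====

-- B replaces A's three filtered-and-sorted comprehensions by ONE classification pass over the
-- sorted union of the key sets (objective: alternative/idiomatic; not claimed faster).

-- ===== PORT A =====
-- three generator comprehensions over the dict keys/items, each sorted
def environment_drift (required : List (String × String)) (actual : List (String × String)) : List (String × List String) :=
  let rd := PySem.Dict.ofList required
  let ad := PySem.Dict.ofList actual
  let missing := PySem.List.sorted (rd.keys.filter (fun name => !(ad.contains name))) (fun x => x) false
  let mismatched := PySem.List.sorted
    ((rd.items.filter (fun nv => ad.contains nv.1 && (ad.getD nv.1 "" != nv.2))).map (fun nv => nv.1)) (fun x => x) false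
  let unexpected := PySem.List.sorted (ad.keys.filter (fun name => !(rd.contains name))) (fun x => x) false
  [("missing", missing), ("mismatched", mismatched), ("unexpected", unexpected)]

-- ===== PORT B =====
-- one loop over sorted(set(required) | set(actual)), appending each key to exactly one bucket
def environment_drift_alt (required : List (String × String)) (actual : List (String × String)) : List (String × List String) :=
  let rd := PySem.Dict.ofList required
  let ad := PySem.Dict.ofList actual
  let names := PySem.List.sorted (PySem.Set.union (PySem.Set.ofList rd.keys) ad.keys) (fun x => x) false
  let res := names.foldl (fun (acc : List String × List String × List String) name =>
      if !(ad.contains name) then (acc.1 ++ [name], acc.2.1, acc.2.2)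
      else if !(rd.contains name) then (acc.1, acc.2.1, acc.2.2 ++ [name])
      else if rd.getD name "" != ad.getD name "" then (acc.1, acc.2.1 ++ [name], acc.2.2)
      else acc) ([], [], [])
  [("missing", res.1), ("mismatched", res.2.1), ("unexpected", res.2.2)]

-- ===== PRECONDITION & SPEC =====
def Spec_environment_drift (required : List (String × String)) (actual : List (String × String)) (out : List (String × List String)) : Prop := out = environment_drift_alt required actual
instance (required : List (String × String)) (actual : List (String × String)) (out : List (String × List String)) : Decidable (Spec_environment_drift required actual out) := by unfold Spec_environment_drift; infer_instance

-- ===== CLAIM (what is proved, stated in full; the proofs are below) =====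
def Claim_equal_environment_drift : Prop := ∀ (required : List (String × String)) (actual : List (String × String)), Dom_environment_drift required actual → Spec_environment_drift required actual (environment_drift required actual)

-- ===== LEMMAS AND PROOFS =====

-- the classification fold builds the three buckets as filters of the traversed list
lemma foldl_classify (L : List String) (c1 c2 c3 : String → Bool) (ms mm ue : List String) :
    L.foldl (fun (acc : List String × List String × List String) name =>
      if c1 name then (acc.1 ++ [name], acc.2.1, acc.2.2)
      else if c2 name then (acc.1, acc.2.1, acc.2.2 ++ [name])
      else if c3 name then (acc.1, acc.2.1 ++ [name], acc.2.2)
      else acc) (ms, mm, ue)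
    = (ms ++ L.filter c1,
       mm ++ L.filter (fun n => !c1 n && !c2 n && c3 n),
       ue ++ L.filter (fun n => !c1 n && c2 n)) := by
  induction L generalizing ms mm ue with
  | nil => simp
  | cons x xs ih =>
    simp only [List.foldl_cons, List.filter_cons]
    by_cases h1 : c1 x <;> by_cases h2 : c2 x <;> by_cases h3 : c3 x <;>
      simp [h1, h2, h3, ih, List.append_assoc]

-- sorting a filtered list = filtering the sorted set, whenever the two filtered
-- collections have the same (nodup) members
lemma sorted_filter_eq (u xs : List String) (p q : String → Bool)
    (hu : u.Nodup) (hx : xs.Nodup)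
    (h : ∀ n, (n ∈ u ∧ p n = true) ↔ (n ∈ xs ∧ q n = true)) :
    (PySem.List.sorted u (fun x => x) false).filter p
      = PySem.List.sorted (xs.filter q) (fun x => x) false := by
  refine (PySem.List.sorted_eq_of_perm_of_pairwise_lt _ _ _ ?_ ?_).symm
  · refine List.Perm.trans ((PySem.List.sorted_perm u (fun x => x) false).filter p) ?_
    refine (List.perm_ext_iff_of_nodup (hu.filter p) (hx.filter q)).2 ?_
    intro n
    simp only [List.mem_filter]
    exact h n
  · have hpw : (PySem.List.sorted u (fun x => x) false).Pairwise (· < ·) := by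
      have h1 := PySem.List.sorted_pairwise u (fun x => x)
      have h2 : (PySem.List.sorted u (fun x => x) false).Nodup :=
        (PySem.List.sorted_perm u (fun x => x) false).nodup_iff.2 hu
      exact h1.imp₂ (fun a b hle hne => lt_of_le_of_ne hle hne) h2
    exact hpw.filter p

-- map-fst of the filtered items list = the keys filtered through getD
lemma items_filter_map_fst (d : PySem.Dict String String) (hnd : d.keys.Nodup)
    (g : String → String → Bool) :
    ((d.items.filter (fun nv => g nv.1 nv.2)).map (fun nv => nv.1))
      = d.keys.filter (fun n => g n (d.getD n "")) := by
  rw [PySem.Dict.items_eq_map_keys d hnd ""]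
  induction d.keys with
  | nil => simp
  | cons k ks ih =>
    by_cases h : g k (d.getD k "") <;> simp [h, ih]

lemma contains_iff_mem (d : PySem.Dict String String) (n : String) :
    d.contains n = true ↔ n ∈ d.keys := PySem.Dict.contains_iff_mem_keys d n

theorem environment_drift_spec : Claim_equal_environment_drift := by
  intro required actual _
  unfold Spec_environment_drift environment_drift environment_drift_alt
  simp only []
  set rd := PySem.Dict.ofList required with hrd
  set ad := PySem.Dict.ofList actual with had
  have hndr : rd.keys.Nodup := PySem.Dict.nodup_keys_ofList required
  have hnda : ad.keys.Nodup := PySem.Dict.nodup_keys_ofList actual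
  have hU : (PySem.Set.union (PySem.Set.ofList rd.keys) ad.keys).Nodup :=
    PySem.Set.nodup_union _ _ (PySem.Set.nodup_ofList _)
  have hmemU : ∀ n, n ∈ PySem.Set.union (PySem.Set.ofList rd.keys) ad.keys ↔
      (n ∈ rd.keys ∨ n ∈ ad.keys) := by
    intro n
    rw [PySem.Set.mem_union, PySem.Set.mem_ofList]
  rw [foldl_classify]
  simp only [List.nil_append]
  have hmissing :
      (PySem.List.sorted (PySem.Set.union (PySem.Set.ofList rd.keys) ad.keys) (fun x => x) false).filter
        (fun name => !(ad.contains name))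
      = PySem.List.sorted (rd.keys.filter (fun name => !(ad.contains name))) (fun x => x) false := by
    refine sorted_filter_eq _ _ _ _ hU hndr ?_
    intro n
    simp only [hmemU, Bool.not_eq_true', ← Bool.not_eq_true]
    constructor
    · rintro ⟨hm, hc⟩
      refine ⟨?_, hc⟩
      rcases hm with h | h
      · exact h
      · exact absurd ((contains_iff_mem ad n).2 h) hc
    · rintro ⟨hm, hc⟩; exact ⟨Or.inl hm, hc⟩
  have hunexp :
      (PySem.List.sorted (PySem.Set.union (PySem.Set.ofList rd.keys) ad.keys) (fun x => x) false).filter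
        (fun n => !(!(ad.contains n)) && !(rd.contains n))
      = PySem.List.sorted (ad.keys.filter (fun name => !(rd.contains name))) (fun x => x) false := by
    refine sorted_filter_eq _ _ _ _ hU hnda ?_
    intro n
    simp only [hmemU, Bool.and_eq_true, Bool.not_eq_true', Bool.not_not, ← Bool.not_eq_true]
    constructor
    · rintro ⟨hm, ha, hr⟩
      exact ⟨(contains_iff_mem ad n).1 ha, hr⟩
    · rintro ⟨hm, hr⟩
      refine ⟨Or.inr hm, (contains_iff_mem ad n).2 hm, hr⟩
  have hmis :
      (PySem.List.sorted (PySem.Set.union (PySem.Set.ofList rd.keys) ad.keys) (fun x => x) false).filter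
        (fun n => !(!(ad.contains n)) && !(!(rd.contains n)) && (rd.getD n "" != ad.getD n ""))
      = PySem.List.sorted
          ((rd.items.filter (fun nv => ad.contains nv.1 && (ad.getD nv.1 "" != nv.2))).map (fun nv => nv.1))
          (fun x => x) false := by
    rw [items_filter_map_fst rd hndr (fun n v => ad.contains n && (ad.getD n "" != v))]
    refine sorted_filter_eq _ _ _ _ hU hndr ?_
    intro n
    simp only [hmemU, Bool.and_eq_true, Bool.not_not, bne_iff_ne]
    constructor
    · rintro ⟨hm, ⟨ha, hr⟩, hne⟩
      exact ⟨(contains_iff_mem rd n).1 hr, ha, hne.symm⟩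
    · rintro ⟨hm, ha, hne⟩
      exact ⟨Or.inl hm, ⟨ha, (contains_iff_mem rd n).2 hm⟩, hne.symm⟩
  rw [hmissing, hunexp, hmis]
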